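-- pv_equiv track=rewrite | github.com/haoran-zh/mmfl-Dec | utility/group_sampling.py | initialize_group
-- ===== SOURCE A (Python) =====
-- def initialize_group(client_num, group_num, label_info):
--     # input
--     # client_num: number of clients
--     # group_num: number of groups
--     # label_info: list of labels of clients. label_info[i] is the available labels of client i
--     # output
--     # group_clients: list of clients in each group
--     # group_clients[i] is a list of clients in group i
--
--     # fin max class idx
--     group_labels = [[0,1,2,3,4],
--                     [5,6,7,8,9]]
--     # group number should be 2
--     g1_list = []
--     g2_list = []
--     for clent_idx in range(client_num):
--         client_labels = label_info[clent_idx]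
--         g1 = sum([1 for label in client_labels if label in group_labels[0]])
--         g2 = sum([1 for label in client_labels if label in group_labels[1]])
--         if g1 > g2: # assign to group 1
--             g1_list.append(clent_idx)
--         else:
--             g2_list.append(clent_idx)
--     group_clients = [g1_list, g2_list]
--     return group_clients
-- ===== SOURCE B (Python) =====
-- def initialize_group(client_num, group_num, label_info):
--     # Single pass per client's label list with one signed net score:
--     # +1 for a label in {0..4}, -1 for a label in {5..9}, unchanged otherwise.
--     g1_list = []
--     g2_list = []
--     for idx in range(client_num):
--         net = 0
--         for label in label_info[idx]:
--             if label in (0, 1, 2, 3, 4):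
--                 net += 1
--             elif label in (5, 6, 7, 8, 9):
--                 net -= 1
--         (g1_list if net > 0 else g2_list).append(idx)
--     return [g1_list, g2_list]
-- ===== Notes on version B (the rewrite author's own statement) =====
-- stated objective: simpler
-- what changed: Replaces the two membership-filtering count comprehensions per client by a single pass over the client's labels that maintains one signed net score (+1 low group, -1 high group) and tests net > 0.
import Mathlib
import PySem

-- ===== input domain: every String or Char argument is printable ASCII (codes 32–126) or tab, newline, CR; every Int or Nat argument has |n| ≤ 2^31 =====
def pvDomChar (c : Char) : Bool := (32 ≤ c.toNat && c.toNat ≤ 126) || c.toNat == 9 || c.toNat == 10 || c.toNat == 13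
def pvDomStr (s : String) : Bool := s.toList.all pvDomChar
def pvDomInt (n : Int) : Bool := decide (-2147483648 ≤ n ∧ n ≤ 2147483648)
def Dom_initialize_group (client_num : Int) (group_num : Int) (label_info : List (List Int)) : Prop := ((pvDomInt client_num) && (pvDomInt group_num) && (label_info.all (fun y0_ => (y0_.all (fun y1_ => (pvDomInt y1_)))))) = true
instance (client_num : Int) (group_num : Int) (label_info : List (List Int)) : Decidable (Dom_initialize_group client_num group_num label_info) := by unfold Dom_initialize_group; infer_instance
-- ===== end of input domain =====

-- B replaces A's two membership-count comprehensions per client by a single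
-- signed net-score pass over the client's labels; return value equivalence on Pre_.

-- ===== PORT A =====
def initialize_group (client_num : Int) (group_num : Int) (label_info : List (List Int)) : List (List Int) :=
  let group_labels : List (List Int) := [[0,1,2,3,4],[5,6,7,8,9]]
  let st := (PySem.List.pyRange 0 client_num 1).foldl
    (fun (st : List Int × List Int) clent_idx =>
      let client_labels := (PySem.List.pyGet? label_info clent_idx).getD []
      let g1 : Int := (client_labels.filter
        (fun label => ((PySem.List.pyGet? group_labels 0).getD []).contains label)).foldl (fun acc _ => acc + 1) 0
      let g2 : Int := (client_labels.filter
        (fun label => ((PySem.List.pyGet? group_labels 1).getD []).contains label)).foldl (fun acc _ => acc + 1) 0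
      if g1 > g2 then (st.1 ++ [clent_idx], st.2) else (st.1, st.2 ++ [clent_idx]))
    ([], [])
  [st.1, st.2]

-- ===== PORT B =====
def initialize_group_alt (client_num : Int) (group_num : Int) (label_info : List (List Int)) : List (List Int) :=
  let st := (PySem.List.pyRange 0 client_num 1).foldl
    (fun (st : List Int × List Int) idx =>
      let labels := (PySem.List.pyGet? label_info idx).getD []
      let net : Int := labels.foldl
        (fun n label =>
          if ([0,1,2,3,4] : List Int).contains label then n + 1
          else if ([5,6,7,8,9] : List Int).contains label then n - 1
          else n) 0
      if net > 0 then (st.1 ++ [idx], st.2) else (st.1, st.2 ++ [idx]))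
    ([], [])
  [st.1, st.2]

-- ===== PRECONDITION & SPEC =====
-- Pre_ excludes exactly the inputs where A raises IndexError: client_num exceeding len(label_info).
def Pre_initialize_group (client_num : Int) (group_num : Int) (label_info : List (List Int)) : Prop :=
  client_num ≤ (label_info.length : Int)
instance (client_num : Int) (group_num : Int) (label_info : List (List Int)) : Decidable (Pre_initialize_group client_num group_num label_info) := by unfold Pre_initialize_group; infer_instance
def pvWitness_initialize_group : Int × Int × List (List Int) := (2, 2, [[0, 5, 7], [1, 2, 9]])

def Spec_initialize_group (client_num : Int) (group_num : Int) (label_info : List (List Int)) (out : List (List Int)) : Prop := out = initialize_group_alt client_num group_num label_info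
instance (client_num : Int) (group_num : Int) (label_info : List (List Int)) (out : List (List Int)) : Decidable (Spec_initialize_group client_num group_num label_info out) := by unfold Spec_initialize_group; infer_instance

-- ===== CLAIM (what is proved, stated in full; the proofs are below) =====
def Claim_equal_initialize_group : Prop := ∀ (client_num : Int) (group_num : Int) (label_info : List (List Int)), Dom_initialize_group client_num group_num label_info → Pre_initialize_group client_num group_num label_info → Spec_initialize_group client_num group_num label_info (initialize_group client_num group_num label_info)

-- ===== LEMMAS AND PROOFS =====

-- Counting a filtered list with an integer accumulator is the accumulator plus the length.
theorem count_foldl (p : Int → Bool) (ls : List Int) (a : Int) :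
    (ls.filter p).foldl (fun acc _ => acc + 1) a = a + ((ls.filter p).length : Int) := by
  induction ls generalizing a with
  | nil => simp
  | cons x xs ih =>
    rw [List.filter_cons]
    by_cases h : p x
    · rw [if_pos h, List.foldl_cons, ih]; push_cast [List.length_cons]; ring
    · rw [if_neg h, ih]

-- The signed net score equals (count in low group) - (count in high group).
theorem net_eq (ls : List Int) (n : Int) :
    ls.foldl (fun n label =>
        if ([0,1,2,3,4] : List Int).contains label then n + 1
        else if ([5,6,7,8,9] : List Int).contains label then n - 1
        else n) n
      = n + ((ls.filter (fun l => ([0,1,2,3,4] : List Int).contains l)).length : Int)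
          - ((ls.filter (fun l => ([5,6,7,8,9] : List Int).contains l)).length : Int) := by
  induction ls generalizing n with
  | nil => simp
  | cons x xs ih =>
    rw [List.foldl_cons, List.filter_cons, List.filter_cons, ih]
    by_cases h1 : ([0,1,2,3,4] : List Int).contains x
    · have h2 : ¬ ([5,6,7,8,9] : List Int).contains x = true := by
        simp only [List.contains_eq_mem, decide_eq_true_eq, List.mem_cons,
          List.not_mem_nil, or_false] at h1 ⊢
        omega
      rw [if_pos h1, if_pos h1, if_neg h2]
      push_cast [List.length_cons]; ring
    · rw [if_neg h1, if_neg h1]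
      by_cases h2 : ([5,6,7,8,9] : List Int).contains x
      · rw [if_pos h2, if_pos h2]; push_cast [List.length_cons]; ring
      · rw [if_neg h2, if_neg h2]

-- Pointwise-equal step functions give equal folds.
theorem foldl_fun_ext {α β : Type} {f g : α → β → α} (h : ∀ a b, f a b = g a b)
    (init : α) (l : List β) : List.foldl f init l = List.foldl g init l := by
  have : f = g := funext fun a => funext fun b => h a b
  rw [this]

-- Per-client: A's two-count comparison decides the same way as B's net score.
theorem step_eq (label_info : List (List Int)) :
    ∀ (st : List Int × List Int) (idx : Int),
      (let client_labels := (PySem.List.pyGet? label_info idx).getD []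
       let g1 : Int := (client_labels.filter
         (fun label => ((PySem.List.pyGet? ([[0,1,2,3,4],[5,6,7,8,9]] : List (List Int)) 0).getD []).contains label)).foldl (fun acc _ => acc + 1) 0
       let g2 : Int := (client_labels.filter
         (fun label => ((PySem.List.pyGet? ([[0,1,2,3,4],[5,6,7,8,9]] : List (List Int)) 1).getD []).contains label)).foldl (fun acc _ => acc + 1) 0
       if g1 > g2 then (st.1 ++ [idx], st.2) else (st.1, st.2 ++ [idx]))
      =
      (let labels := (PySem.List.pyGet? label_info idx).getD []
       let net : Int := labels.foldl
         (fun n label =>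
           if ([0,1,2,3,4] : List Int).contains label then n + 1
           else if ([5,6,7,8,9] : List Int).contains label then n - 1
           else n) 0
       if net > 0 then (st.1 ++ [idx], st.2) else (st.1, st.2 ++ [idx])) := by
  intro st idx
  have e0 : (PySem.List.pyGet? ([[0,1,2,3,4],[5,6,7,8,9]] : List (List Int)) 0).getD [] = [0,1,2,3,4] := by decide
  have e1 : (PySem.List.pyGet? ([[0,1,2,3,4],[5,6,7,8,9]] : List (List Int)) 1).getD [] = [5,6,7,8,9] := by decide
  simp only [e0, e1]
  set ls := (PySem.List.pyGet? label_info idx).getD [] with hls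
  rw [count_foldl, count_foldl, net_eq]
  refine if_congr ?_ rfl rfl
  omega

theorem initialize_group_spec : Claim_equal_initialize_group := by
  intro client_num group_num label_info _ _
  unfold Spec_initialize_group initialize_group initialize_group_alt
  simp only
  congr 2 <;> rw [foldl_fun_ext (step_eq label_info)]
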